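-- pv_equiv track=rewrite | github.com/AlexTalorJr/source-code-security-ai-checker | src/scanner/api/config.py | validate_extra_args
-- ===== SOURCE A (Python) =====
-- def validate_extra_args(args: list[str]) -> str | None:
--     """Validate extra_args list. Returns error message or None if valid."""
--     for arg in args:
--         if not arg or not arg.strip():
--             return "Empty argument not allowed"
--     joined = " ".join(args)
--     if joined.count("'") % 2 != 0:
--         return "Unbalanced single quotes"
--     if joined.count('"') % 2 != 0:
--         return "Unbalanced double quotes"
--     return None
-- ===== SOURCE B (Python) =====
-- def validate_extra_args(args: list[str]) -> str | None:
--     """Character-level parity scan: two XOR toggle bits over the raw characters,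
--     no joined string and no substring counting."""
--     if any(not arg.strip() for arg in args):
--         return "Empty argument not allowed"
--     single_odd = False
--     double_odd = False
--     for arg in args:
--         for ch in arg:
--             if ch == "'":
--                 single_odd = not single_odd
--             elif ch == '"':
--                 double_odd = not double_odd
--     if single_odd:
--         return "Unbalanced single quotes"
--     if double_odd:
--         return "Unbalanced double quotes"
--     return None
-- ===== Notes on version B (the rewrite author's own statement) =====
-- stated objective: alternative
-- what changed: Replaces A's join-then-count-mod-2 scans with a character-level automaton: a declarative any() blank check, then one pass over the raw characters flipping two XOR parity bits (no joined string, no substring counting, no arithmetic).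
import Mathlib
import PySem

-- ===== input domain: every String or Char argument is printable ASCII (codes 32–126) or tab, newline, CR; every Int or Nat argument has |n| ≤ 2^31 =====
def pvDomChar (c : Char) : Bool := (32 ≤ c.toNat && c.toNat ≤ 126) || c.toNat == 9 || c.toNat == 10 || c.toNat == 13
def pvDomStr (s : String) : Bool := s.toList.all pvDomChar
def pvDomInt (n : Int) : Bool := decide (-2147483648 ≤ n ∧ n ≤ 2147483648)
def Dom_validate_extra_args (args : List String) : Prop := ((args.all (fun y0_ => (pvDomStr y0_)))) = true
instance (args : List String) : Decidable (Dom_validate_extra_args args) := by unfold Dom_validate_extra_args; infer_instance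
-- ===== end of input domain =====

-- B scans the raw characters once, flipping two XOR parity bits, instead of A's join-then-count-mod-2 (objective: alternative).

-- ===== PORT A =====
-- the for-loop with early return; after exhausting it, the join-and-count checks run on the full list
def aLoop (args : List String) : List String → Option String
  | [] =>
    let joined := PySem.Str.join " " args
    if PySem.Str.count joined "'" % 2 ≠ 0 then some "Unbalanced single quotes"
    else if PySem.Str.count joined "\"" % 2 ≠ 0 then some "Unbalanced double quotes"
    else none
  | a :: rest =>
    if a = "" ∨ PySem.Str.strip a = "" then some "Empty argument not allowed"
    else aLoop args rest

def validate_extra_args (args : List String) : Option String := aLoop args args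

-- ===== PORT B =====
-- inner character loop of Source B: toggle the two parity bits
def bScanArg : List Char → Bool × Bool → Bool × Bool
  | [], sd => sd
  | c :: t, (s, d) =>
    if c = '\'' then bScanArg t (!s, d)
    else if c = '"' then bScanArg t (s, !d)
    else bScanArg t (s, d)

def validate_extra_args_alt (args : List String) : Option String :=
  if args.any (fun a => PySem.Str.strip a = "") then some "Empty argument not allowed"
  else
    let sd := args.foldl (fun sd a => bScanArg a.toList sd) (false, false)
    if sd.1 then some "Unbalanced single quotes"
    else if sd.2 then some "Unbalanced double quotes"
    else none

-- ===== PRECONDITION & SPEC =====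
def Spec_validate_extra_args (args : List String) (out : Option String) : Prop := out = validate_extra_args_alt args
instance (args : List String) (out : Option String) : Decidable (Spec_validate_extra_args args out) := by unfold Spec_validate_extra_args; infer_instance

-- ===== CLAIM (what is proved, stated in full; the proofs are below) =====
def Claim_equal_validate_extra_args : Prop := ∀ (args : List String), Dom_validate_extra_args args → Spec_validate_extra_args args (validate_extra_args args)

-- ===== LEMMAS AND PROOFS =====

-- counting a single character as a substring is counting that character
theorem count_go_singleton (c : Char) : ∀ (fuel : Nat) (l : List Char) (acc : Nat),
    l.length ≤ fuel → PySem.Chars.count.go [c] fuel l acc = acc + l.count c := by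
  intro fuel
  induction fuel with
  | zero =>
    intro l acc h
    have : l = [] := List.eq_nil_of_length_eq_zero (Nat.le_zero.mp h)
    subst this
    simp [PySem.Chars.count.go]
  | succ n ih =>
    intro l acc h
    cases l with
    | nil => simp [PySem.Chars.count.go]
    | cons x t =>
      simp only [PySem.Chars.count.go]
      by_cases hx : x = c
      · subst hx
        simp only [List.isPrefixOf, BEq.rfl, Bool.and_eq_true, and_true, if_pos,
          List.length_cons, List.length_nil, List.drop_succ_cons, List.drop_zero]
        have := ih t (acc + 1) (by simpa using Nat.lt_succ_iff.mp (by simpa using h))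
        rw [this]
        simp
        omega
      · have hpre : List.isPrefixOf [c] (x :: t) = false := by
          simp [List.isPrefixOf]
          exact fun hh => hx hh.symm
        rw [hpre]
        simp only [Bool.false_eq_true, if_false]
        have := ih t acc (by simpa using Nat.lt_succ_iff.mp (by simpa using h))
        rw [this]
        simp [hx]

theorem count_singleton (c : Char) (l : List Char) :
    PySem.Chars.count l [c] = l.count c := by
  simp [PySem.Chars.count]
  simpa using count_go_singleton c l.length l 0 le_rfl

-- counting a character across an intercalation whose separator avoids it = summing per-piece counts
theorem count_intercalate (c sep : Char) (h : sep ≠ c) :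
    ∀ (parts : List (List Char)),
      (List.intercalate [sep] parts).count c = (parts.map (fun p => p.count c)).sum := by
  intro parts
  induction parts with
  | nil => simp [List.intercalate]
  | cons p rest ih =>
    cases rest with
    | nil => simp [List.intercalate]
    | cons q r =>
      have step : List.intercalate [sep] (p :: q :: r) = p ++ [sep] ++ List.intercalate [sep] (q :: r) := by
        simp [List.intercalate, List.intersperse]
      rw [step]
      simp only [List.count_append, List.map_cons, List.sum_cons] at *
      rw [ih]
      simp [h]

-- count of a quote in the joined string = sum of per-argument counts
theorem count_join_quote (c : Char) (h : c ≠ ' ') (args : List String) :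
    PySem.Chars.count (PySem.Chars.join [' '] (args.map String.toList)) [c]
      = (args.map (fun a => a.toList.count c)).sum := by
  simp only [count_singleton, PySem.Chars.join]
  rw [count_intercalate c ' ' (fun hh => h hh.symm)]
  simp [Function.comp_def]

-- A's loop in closed form
theorem aLoop_eq (args : List String) : ∀ (rest : List String),
    aLoop args rest =
      if rest.any (fun a => decide (a = "" ∨ PySem.Str.strip a = "")) then
        some "Empty argument not allowed"
      else
        (if PySem.Str.count (PySem.Str.join " " args) "'" % 2 ≠ 0 then some "Unbalanced single quotes"
         else if PySem.Str.count (PySem.Str.join " " args) "\"" % 2 ≠ 0 then some "Unbalanced double quotes"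
         else none) := by
  intro rest
  induction rest with
  | nil => simp [aLoop]
  | cons a t ih =>
    by_cases ha : a = "" ∨ PySem.Str.strip a = "" <;> simp [aLoop, ha, ih]

-- the blank test a = "" ∨ strip a = "" collapses to strip a = "" (strip "" = "")
theorem blank_iff (a : String) : (a = "" ∨ PySem.Str.strip a = "") ↔ PySem.Str.strip a = "" := by
  constructor
  · rintro (rfl | h)
    · decide
    · exact h
  · exact Or.inr

-- the character scan computes the parity of the two quote counts, XORed onto the incoming bits
theorem parity_decide (m n : Nat) : decide ((m + n) % 2 = 1) = (decide (m % 2 = 1) ^^ decide (n % 2 = 1)) := by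
  by_cases hm : m % 2 = 1 <;> by_cases hn : n % 2 = 1 <;>
    simp [hm, hn] <;> omega

theorem xor_succ (b : Bool) (n : Nat) : (b != decide (n % 2 = 1)) = !(b ^^ decide ((n + 1) % 2 = 1)) := by
  rw [parity_decide n 1]
  cases b <;> simp

theorem xor_parity_add (b : Bool) (m n : Nat) :
    ((b ^^ decide (m % 2 = 1)) ^^ decide (n % 2 = 1)) = (b ^^ decide ((m + n) % 2 = 1)) := by
  rw [parity_decide, Bool.xor_assoc]

theorem bScanArg_eq : ∀ (l : List Char) (s d : Bool),
    bScanArg l (s, d) = (xor s (decide (l.count '\'' % 2 = 1)), xor d (decide (l.count '"' % 2 = 1))) := by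
  intro l
  induction l with
  | nil => intro s d; simp [bScanArg]
  | cons c t ih =>
    intro s d
    by_cases h1 : c = '\''
    · subst h1
      simp [bScanArg, ih]
      exact xor_succ s _
    · by_cases h2 : c = '"'
      · subst h2
        simp [bScanArg, h1, ih]
        exact xor_succ d _
      · simp [bScanArg, h1, h2, ih]

-- folding the scan over the arguments = parity of the summed counts
theorem fold_scan_eq : ∀ (args : List String) (s d : Bool),
    args.foldl (fun sd a => bScanArg a.toList sd) (s, d)
      = (xor s (decide ((args.map (fun a => a.toList.count '\'')).sum % 2 = 1)),
         xor d (decide ((args.map (fun a => a.toList.count '"')).sum % 2 = 1))) := by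
  intro args
  induction args with
  | nil => intro s d; simp
  | cons a t ih =>
    intro s d
    simp only [List.foldl_cons, bScanArg_eq, ih, List.map_cons, List.sum_cons, xor_parity_add]
    rfl

-- ===== VERDICT (by name: the statement is the Claim_ definition above) =====
theorem validate_extra_args_spec : Claim_equal_validate_extra_args := by
  intro args _
  show validate_extra_args args = validate_extra_args_alt args
  unfold validate_extra_args validate_extra_args_alt
  rw [aLoop_eq]
  have hany : (args.any (fun a => decide (a = "" ∨ PySem.Str.strip a = "")))
      = (args.any (fun a => decide (PySem.Str.strip a = ""))) := by
    apply List.any_congr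
    · rfl
    · intro a
      simp [blank_iff a]
  rw [hany, fold_scan_eq]
  have h1 := count_join_quote '\'' (by decide) args
  have h2 := count_join_quote '"' (by decide) args
  by_cases hb : args.any (fun a => decide (PySem.Str.strip a = "")) = true
  · simp [hb]
  · simp only [hb, Bool.false_eq_true, if_false, Bool.false_xor]
    have e1 : ((args.map (fun a => a.toList.count '\'')).sum % 2 ≠ 0)
        ↔ ((args.map (fun a => a.toList.count '\'')).sum % 2 = 1) := by omega
    have e2 : ((args.map (fun a => a.toList.count '"')).sum % 2 ≠ 0)
        ↔ ((args.map (fun a => a.toList.count '"')).sum % 2 = 1) := by omega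
    simp [PySem.Str.count, PySem.Str.join, h1, h2, e1, e2]
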